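-- pv_equiv track=rewrite | github.com/aasparks/cryptopals-py-rkt | cryptopals-py/set3/c23.py | unbitshift_right
-- ===== SOURCE A (Python) =====
-- def unbitshift_right(value, shift):
--     """
--     Reverses the right bitshift operation of MT19937.
--
--     Args:
--         value: The value after being shifted.
--         shift: The amount the original value was shifted by.
--
--     Returns:
--         The value before the right bitshift happened.
--     """
--     i      = 0
--     result = 0
--
--     while i * shift < 32:
--         part_mask = rlshift((-1 << (32 - shift)), (shift * i))
--         part      = value & part_mask
--         value     ^= rlshift(part, shift)
--         result    |= part
--         i         += 1
--     return result
--
-- def rlshift(value, n):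
--     """
--     Performs a logical right shift.
--
--     Args:
--         value: The value to be shifted
--         n: The amount to shift by
--
--     Return:
--         The logical right shift (value >>> n)
--     """
--     return (value % 0x100000000) >> n
-- ===== SOURCE B (Python) =====
-- def unbitshift_right(value, shift):
--     """
--     Reverses the right bitshift operation of MT19937, rebuilding the
--     original word one bit at a time from the top: bit j of the original
--     equals bit j of value xor bit (j+shift) of the already-recovered bits.
--     """
--     result = 0
--     for j in range(31, -1, -1):
--         bit = ((value >> j) & 1) ^ ((result >> (j + shift)) & 1)
--         result |= bit << j
--     return result
-- ===== Notes on version B (the rewrite author's own statement) =====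
-- stated objective: alternative
-- what changed: Replaces A's block-wise mask extraction (build a shifted block mask, AND it out of value, XOR value, OR parts together over 32/shift iterations) with a bit-by-bit reconstruction: a fixed 32-step descending loop recovering bit j of the original as bit j of value xor bit (j+shift) of the already-recovered result.
import Mathlib
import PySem

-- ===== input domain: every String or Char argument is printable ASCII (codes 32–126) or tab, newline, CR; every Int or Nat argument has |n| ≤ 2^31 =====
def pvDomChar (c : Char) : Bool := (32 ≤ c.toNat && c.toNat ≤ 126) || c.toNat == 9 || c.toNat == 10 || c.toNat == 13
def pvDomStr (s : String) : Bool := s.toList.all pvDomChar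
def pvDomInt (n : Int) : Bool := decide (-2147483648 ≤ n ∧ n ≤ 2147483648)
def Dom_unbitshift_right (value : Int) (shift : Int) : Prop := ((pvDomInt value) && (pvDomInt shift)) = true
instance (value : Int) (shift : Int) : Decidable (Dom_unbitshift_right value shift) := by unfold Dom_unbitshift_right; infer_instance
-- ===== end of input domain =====

-- B replaces A's block-wise mask extraction with a bit-by-bit reconstruction:
-- a fixed 32-step descending loop recovering bit j of the original as bit j of
-- value xor bit (j+shift) of the already-recovered result.


-- ===== PORT A =====
-- rlshift(value, n): logical right shift on 32 bits, (value % 0x100000000) >> n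
def rlshift (value : Int) (n : Int) : Int :=
  PySem.Int.mod value 4294967296 >>> n.toNat

-- A's while loop; the fuel argument only makes the recursion total (the guard
-- stops it after at most 32 iterations whenever 1 ≤ shift, so 33 never runs out)
def unbitshiftGo (value : Int) (shift : Int) (i : Int) (result : Int) : Nat → Int
  | 0 => result
  | fuel+1 =>
    if i * shift < 32 then
      let part_mask := rlshift ((-1 : Int) <<< (32 - shift).toNat) (shift * i)
      let part := PySem.Int.band value part_mask
      unbitshiftGo (PySem.Int.bxor value (rlshift part shift)) shift (i + 1)
        (PySem.Int.bor result part) fuel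
    else result

def unbitshift_right (value : Int) (shift : Int) : Int :=
  unbitshiftGo value shift 0 0 33

-- ===== PORT B =====
-- Source B's for-loop over range(31, -1, -1): one bit of the result per step
def altGo (value : Int) (shift : Int) : List Int → Int → Int
  | [], result => result
  | j :: rest, result =>
    altGo value shift rest (PySem.Int.bor result
      ((PySem.Int.bxor (PySem.Int.band (value >>> j.toNat) 1)
                       (PySem.Int.band (result >>> (j + shift).toNat) 1)) <<< j.toNat))

def unbitshift_right_alt (value : Int) (shift : Int) : Int :=
  altGo value shift (PySem.List.pyRange 31 (-1) (-1)) 0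

-- ===== PRECONDITION & SPEC =====
-- Pre_ excludes exactly the inputs on which A does not return: shift = 0 loops
-- forever, and shift < 0 or shift > 32 raises ValueError (negative shift count).
def Pre_unbitshift_right (value : Int) (shift : Int) : Prop := 1 ≤ shift ∧ shift ≤ 32
instance (value : Int) (shift : Int) : Decidable (Pre_unbitshift_right value shift) := by
  unfold Pre_unbitshift_right; infer_instance

def pvWitness_unbitshift_right : Int × Int := (305419896, 7)

def Spec_unbitshift_right (value : Int) (shift : Int) (out : Int) : Prop := out = unbitshift_right_alt value shift
instance (value : Int) (shift : Int) (out : Int) : Decidable (Spec_unbitshift_right value shift out) := by unfold Spec_unbitshift_right; infer_instance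

-- ===== CLAIM (what is proved, stated in full; the proofs are below) =====
def Claim_equal_unbitshift_right : Prop := ∀ (value : Int) (shift : Int), Dom_unbitshift_right value shift → Pre_unbitshift_right value shift → Spec_unbitshift_right value shift (unbitshift_right value shift)

-- ===== LEMMAS AND PROOFS =====

-- the low 32 bits of a Python integer (Python % = Int.emod for a positive modulus)
def low (a : Int) : Nat := (a % 4294967296).toNat

-- bit j of the untempered word: x_j = v_j xor x_(j+s), for step s = t + 1
def xbit (v t : Nat) (j : Nat) : Bool :=
  if _h : j < 32 then xor (v.testBit j) (xbit v t (j + t + 1)) else false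
  termination_by 32 - j
  decreasing_by omega

-- the 32-bit block mask A extracts at iteration k
def maskN (s k : Nat) : Nat := (2 ^ 32 - 2 ^ (32 - s)) >>> (s * k)

-- Nat-level model of A's loop state
def natA (v r : Nat) (s k : Nat) : Nat → Nat
  | 0 => r
  | fuel+1 =>
    if k * s < 32 then
      natA (v ^^^ ((v &&& maskN s k) >>> s)) (r ||| (v &&& maskN s k)) s (k + 1) fuel
    else r

-- the descending index list [m-1, …, 1, 0] that B's for-loop walks
def downRange : Nat → List Nat
  | 0 => []
  | m+1 => m :: downRange m

-- Nat-level model of B's loop state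
def natC (v s : Nat) : List Nat → Nat → Nat
  | [], r => r
  | j :: rest, r =>
    natC v s rest (r ||| ((((v >>> j) &&& 1) ^^^ ((r >>> (j + s)) &&& 1)) <<< j))

theorem pv_testBit_ge32 {x : ℕ} (hx : x < 2 ^ 32) {j : ℕ} (hj : 32 ≤ j) :
    x.testBit j = false :=
  Nat.testBit_lt_two_pow (lt_of_lt_of_le hx (Nat.pow_le_pow_right (by norm_num) hj))

-- borrow-free subtraction is xor
theorem pv_sub_xor (x : ℕ) : ∀ y : ℕ,
    (∀ i, y.testBit i = true → x.testBit i = true) → y ≤ x ∧ x - y = x ^^^ y := by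
  induction x using Nat.strong_induction_on with
  | _ x IH =>
    intro y hsub
    by_cases hx : x = 0
    · subst hx
      have hy : y = 0 := Nat.eq_of_testBit_eq (fun i => by
        cases h : y.testBit i
        · simp [Nat.zero_testBit]
        · have := hsub i h; simp [Nat.zero_testBit] at this)
      subst hy; simp
    · have hx2 : x / 2 < x := Nat.div_lt_self (Nat.pos_of_ne_zero hx) one_lt_two
      have hhalf : ∀ i, (y / 2).testBit i = true → (x / 2).testBit i = true := by
        intro i h
        rw [Nat.testBit_div_two] at h ⊢
        exact hsub _ h
      obtain ⟨hle, hxor⟩ := IH (x / 2) hx2 (y / 2) hhalf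
      have hbit : y % 2 ≤ x % 2 := by
        have h0 := hsub 0
        rw [Nat.testBit_zero, Nat.testBit_zero] at h0
        by_cases hy0 : y % 2 = 1
        · simp [hy0] at h0; omega
        · omega
      have hx0 : (x ^^^ y) % 2 = x % 2 - y % 2 := by
        rw [Nat.xor_mod_two_eq]; omega
      have hx1 : (x ^^^ y) / 2 = (x / 2) ^^^ (y / 2) := Nat.xor_div_two
      set u := x ^^^ y with hu
      rw [← hx1] at hxor
      constructor <;> omega

theorem pv_low_natCast (n : ℕ) : low (↑n) = n % 2 ^ 32 := by
  unfold low; omega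

theorem pv_band_natCast_low (a : Int) (m : ℕ) (hm : m < 2 ^ 32) :
    PySem.Int.band a (↑m) = ↑(low a &&& m) := by
  by_cases ha : 0 ≤ a
  · rw [PySem.Int.band_of_nonneg ha (by positivity)]
    have hl : low a = a.toNat % 2 ^ 32 := by unfold low; omega
    rw [Int.toNat_natCast, hl]
    congr 1
    apply Nat.eq_of_testBit_eq
    intro i
    simp only [Nat.testBit_land, Nat.testBit_mod_two_pow]
    by_cases hi : i < 32
    · simp [hi]
    · have h1 : m.testBit i = false := pv_testBit_ge32 hm (by omega)
      simp [hi, h1]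
  · have hastep : PySem.Int.band a (↑m) = ↑(m - (m &&& (-a - 1).toNat)) := by
      unfold PySem.Int.band
      rw [if_neg ha, if_pos (by positivity)]
      simp
    rw [hastep]
    congr 1
    set k := (-a - 1).toNat with hk
    have hlow : low a = 2 ^ 32 - 1 - k % 2 ^ 32 := by unfold low; omega
    obtain ⟨_, hxor1⟩ := pv_sub_xor (2 ^ 32 - 1) (k % 2 ^ 32) (by
      intro i hi
      rw [Nat.testBit_two_pow_sub_one]
      rw [Nat.testBit_mod_two_pow] at hi
      simp at hi ⊢; exact hi.1)
    obtain ⟨_, hxor2⟩ := pv_sub_xor m (m &&& k) (by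
      intro i hi
      rw [Nat.testBit_land] at hi
      exact (Bool.and_eq_true ..).mp hi |>.1)
    rw [hxor2, hlow, hxor1]
    apply Nat.eq_of_testBit_eq
    intro i
    simp only [Nat.testBit_xor, Nat.testBit_land, Nat.testBit_mod_two_pow,
      Nat.testBit_two_pow_sub_one]
    by_cases hi : i < 32
    · simp only [hi, decide_true, Bool.true_and]
      cases hm' : m.testBit i <;> cases hk' : k.testBit i <;> simp
    · have h1 : m.testBit i = false := pv_testBit_ge32 hm (by omega)
      simp [hi, h1]

theorem pv_low_bxor (a : Int) (p : ℕ) (hp : p < 2 ^ 32) :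
    low (PySem.Int.bxor a (↑p)) = low a ^^^ p := by
  by_cases ha : 0 ≤ a
  · rw [PySem.Int.bxor_of_nonneg ha (by positivity)]
    rw [Int.toNat_natCast]
    have hl : low a = a.toNat % 2 ^ 32 := by unfold low; omega
    have hl2 : low ((a.toNat ^^^ p : ℕ) : Int) = (a.toNat ^^^ p) % 2 ^ 32 := by unfold low; omega
    rw [hl, hl2]
    apply Nat.eq_of_testBit_eq
    intro i
    simp only [Nat.testBit_xor, Nat.testBit_mod_two_pow]
    by_cases hi : i < 32
    · simp [hi]
    · have h1 : p.testBit i = false := pv_testBit_ge32 hp (by omega)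
      simp [hi, h1]
  · set k := (-a - 1).toNat with hk
    have hstep : PySem.Int.bxor a (↑p) = -↑(k ^^^ p) - 1 := by
      unfold PySem.Int.bxor
      rw [if_neg ha, if_pos (by positivity)]
      simp
      omega
    rw [hstep]
    have hl : low (-↑(k ^^^ p) - 1) = 2 ^ 32 - 1 - (k ^^^ p) % 2 ^ 32 := by unfold low; omega
    have hla : low a = 2 ^ 32 - 1 - k % 2 ^ 32 := by unfold low; omega
    obtain ⟨_, hxor1⟩ := pv_sub_xor (2 ^ 32 - 1) ((k ^^^ p) % 2 ^ 32) (by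
      intro i hi
      rw [Nat.testBit_mod_two_pow] at hi
      rw [Nat.testBit_two_pow_sub_one]
      simp at hi ⊢; exact hi.1)
    obtain ⟨_, hxor2⟩ := pv_sub_xor (2 ^ 32 - 1) (k % 2 ^ 32) (by
      intro i hi
      rw [Nat.testBit_mod_two_pow] at hi
      rw [Nat.testBit_two_pow_sub_one]
      simp at hi ⊢; exact hi.1)
    rw [hl, hla, hxor1, hxor2]
    apply Nat.eq_of_testBit_eq
    intro i
    simp only [Nat.testBit_xor, Nat.testBit_mod_two_pow, Nat.testBit_two_pow_sub_one]
    by_cases hi : i < 32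
    · simp only [hi, decide_true, Bool.true_and]
      cases k.testBit i <;> cases p.testBit i <;> simp
    · have h1 : p.testBit i = false := pv_testBit_ge32 hp (by omega)
      simp [hi, h1]

theorem pv_rlshift_natCast (a : Int) (n : ℕ) :
    rlshift a (↑n) = ↑(low a >>> n) := by
  unfold rlshift
  rw [PySem.Int.mod_eq_emod_of_pos (by norm_num)]
  have h1 : a % 4294967296 = ((low a : ℕ) : Int) := by unfold low; omega
  rw [h1, Int.toNat_natCast]
  rfl

theorem pv_maskN_lt (s k : ℕ) (hs1 : 1 ≤ s) : maskN s k < 2 ^ 32 := by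
  unfold maskN
  have h1 : (2 ^ 32 - 2 ^ (32 - s)) >>> (s * k) ≤ 2 ^ 32 - 2 ^ (32 - s) :=
    Nat.shiftRight_le _ _
  have h2 : 0 < 2 ^ (32 - s) := Nat.two_pow_pos _
  have h3 : 2 ^ (32 - s) ≤ 2 ^ 32 := Nat.pow_le_pow_right (by norm_num) (by omega)
  omega

theorem pv_maskN_testBit (s k j : ℕ) (hs1 : 1 ≤ s) (hs2 : s ≤ 32) :
    (maskN s k).testBit j = (decide (32 ≤ j + s * k + s) && decide (j + s * k < 32)) := by
  unfold maskN
  have h2 : 0 < 2 ^ (32 - s) := Nat.two_pow_pos _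
  have h3 : 2 ^ (32 - s) ≤ 2 ^ 32 := Nat.pow_le_pow_right (by norm_num) (by omega)
  obtain ⟨_, hxor⟩ := pv_sub_xor (2 ^ 32 - 1) (2 ^ (32 - s) - 1) (by
    intro i hi
    rw [Nat.testBit_two_pow_sub_one] at hi ⊢
    simp at hi ⊢; omega)
  have hrepr : 2 ^ 32 - 2 ^ (32 - s) = (2 ^ 32 - 1) ^^^ (2 ^ (32 - s) - 1) := by omega
  rw [hrepr, Nat.testBit_shiftRight, Nat.testBit_xor, Nat.testBit_two_pow_sub_one,
    Nat.testBit_two_pow_sub_one]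
  by_cases hA : s * k + j < 32 - s <;> by_cases hB : s * k + j < 32 <;>
    simp [hA, hB] <;> omega

theorem pv_mask_eq (s k : ℕ) (hs1 : 1 ≤ s) (hs2 : s ≤ 32) :
    rlshift ((-1 : Int) <<< ((32 : Int) - ↑s).toNat) (↑s * ↑k) = ↑(maskN s k) := by
  have h2 : 0 < 2 ^ (32 - s) := Nat.two_pow_pos _
  have h3 : 2 ^ (32 - s) ≤ 2 ^ 32 := Nat.pow_le_pow_right (by norm_num) (by omega)
  have ht : ((32 : Int) - ↑s).toNat = 32 - s := by omega
  have hsl : (-1 : Int) <<< (32 - s) = -((2 ^ (32 - s) : ℕ) : Int) := by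
    rw [Int.shiftLeft_eq]
    push_cast
    ring
  have hmul : (↑s * ↑k : Int) = ((s * k : ℕ) : Int) := by push_cast; ring
  rw [ht, hsl, hmul, pv_rlshift_natCast]
  have hlow : low (-((2 ^ (32 - s) : ℕ) : Int)) = 2 ^ 32 - 2 ^ (32 - s) := by
    unfold low; omega
  rw [hlow]
  rfl

theorem pv_portA (s : ℕ) (hs1 : 1 ≤ s) (hs2 : s ≤ 32) :
    ∀ (fuel : ℕ) (k r : ℕ) (value : Int),
      unbitshiftGo value (↑s) (↑k) (↑r) fuel = ↑(natA (low value) r s k fuel) := by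
  intro fuel
  induction fuel with
  | zero => intro k r value; rfl
  | succ fuel IH =>
    intro k r value
    rw [unbitshiftGo, natA]
    by_cases hg : k * s < 32
    · have hgi : ((k : Int) * (s : Int) < 32) := by exact_mod_cast hg
      rw [if_pos hgi, if_pos hg]
      dsimp only
      have hmlt := pv_maskN_lt s k hs1
      rw [pv_mask_eq s k hs1 hs2]
      rw [pv_band_natCast_low value _ hmlt]
      set p := low value &&& maskN s k with hp
      have hplt : p < 2 ^ 32 := lt_of_le_of_lt Nat.and_le_right hmlt
      have hlowp : low ((p : ℕ) : Int) = p := by rw [pv_low_natCast]; omega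
      rw [pv_rlshift_natCast, hlowp]
      have hps : p >>> s < 2 ^ 32 := lt_of_le_of_lt (Nat.shiftRight_le _ _) hplt
      rw [PySem.Int.bor_natCast]
      rw [show ((k : Int) + 1) = ((k + 1 : ℕ) : Int) by push_cast; ring]
      rw [IH (k + 1) (r ||| p) _]
      rw [pv_low_bxor value _ hps]
    · have hgi : ¬((k : Int) * (s : Int) < 32) := by exact_mod_cast hg
      rw [if_neg hgi, if_neg hg]

theorem pv_xbit_ge (v t j : ℕ) (hj : 32 ≤ j) : xbit v t j = false := by
  rw [xbit]
  simp [Nat.not_lt.mpr hj]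

theorem pv_xbit_lt (v s j : ℕ) (hs : 1 ≤ s) (hj : j < 32) :
    xbit v (s - 1) j = xor (v.testBit j) (xbit v (s - 1) (j + s)) := by
  rw [xbit]
  simp only [hj, dif_pos]
  congr 2
  omega

theorem pv_invA (v s : ℕ) (hs1 : 1 ≤ s) (hs2 : s ≤ 32) :
    ∀ (fuel k r : ℕ), 32 ≤ s * (k + fuel) →
      (∀ j, r.testBit j = (decide (32 ≤ j + s * k) && xbit v (s - 1) j)) →
      ∀ j, (natA (v ^^^ (r >>> s)) r s k fuel).testBit j = xbit v (s - 1) j := by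
  intro fuel
  induction fuel with
  | zero =>
    intro k r htot hr j
    rw [natA, hr j]
    have htot' : 32 ≤ s * k := by simpa using htot
    have h1 : 32 ≤ j + s * k := by omega
    simp [h1]
  | succ fuel IH =>
    intro k r htot hr j
    have e1 : s * (k + 1) = s * k + s := by ring
    have e2 : s * (k + (fuel + 1)) = s * k + s + s * fuel := by ring
    have e3 : s * ((k + 1) + fuel) = s * k + s + s * fuel := by ring
    rw [natA]
    by_cases hg : k * s < 32
    · rw [if_pos hg]
      have hg2 : s * k < 32 := by rwa [Nat.mul_comm] at hg
      set p := (v ^^^ (r >>> s)) &&& maskN s k with hp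
      have hpbit : ∀ i, p.testBit i =
          ((xor (v.testBit i) (r.testBit (i + s))) &&
            (decide (32 ≤ i + s * k + s) && decide (i + s * k < 32))) := by
        intro i
        rw [hp, Nat.testBit_land, Nat.testBit_xor, Nat.testBit_shiftRight,
          pv_maskN_testBit s k i hs1 hs2, Nat.add_comm s i]
      have hr' : ∀ i, (r ||| p).testBit i
          = (decide (32 ≤ i + s * (k + 1)) && xbit v (s - 1) i) := by
        intro i
        rw [Nat.testBit_lor, hr i, hpbit i]
        by_cases h1 : 32 ≤ i + s * k
        · have h0 : ¬ (i + s * k < 32) := by omega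
          have h2 : 32 ≤ i + s * (k + 1) := by omega
          simp [h0, h1, h2]
        · by_cases h2 : 32 ≤ i + s * k + s
          · have hi32 : i < 32 := by omega
            have h3 : i + s * k < 32 := by omega
            have h4 : 32 ≤ i + s * (k + 1) := by omega
            have hr2 : r.testBit (i + s) = xbit v (s - 1) (i + s) := by
              rw [hr (i + s)]
              have : 32 ≤ (i + s) + s * k := by omega
              simp [this]
            simp only [h1, h2, h3, h4, decide_true, decide_false, Bool.false_and,
              Bool.false_or, Bool.and_true, Bool.true_and]
            rw [hr2, pv_xbit_lt v s i hs1 hi32]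
          · have h3 : ¬ (32 ≤ i + s * (k + 1)) := by omega
            simp [h1, h2, h3]
      have hvarg : (v ^^^ (r >>> s)) ^^^ (p >>> s) = v ^^^ ((r ||| p) >>> s) := by
        apply Nat.eq_of_testBit_eq
        intro i
        simp only [Nat.testBit_xor, Nat.testBit_shiftRight, Nat.testBit_lor]
        have hdisj : ¬ (r.testBit (s + i) = true ∧ p.testBit (s + i) = true) := by
          rintro ⟨hR, hP⟩
          rw [hr (s + i)] at hR
          rw [hpbit (s + i)] at hP
          simp only [Bool.and_eq_true, decide_eq_true_eq] at hR hP
          omega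
        cases hR : r.testBit (s + i) <;> cases hP : p.testBit (s + i) <;>
          simp [hR, hP] at hdisj ⊢
      rw [hvarg]
      exact IH (k + 1) (r ||| p) (by omega) hr' j
    · rw [if_neg hg]
      have hg2 : ¬ s * k < 32 := by rwa [Nat.mul_comm] at hg
      rw [hr j]
      have h1 : 32 ≤ j + s * k := by omega
      simp [h1]

-- every index B's loop walks is below the word width
theorem pv_downRange_mem : ∀ m, ∀ j ∈ downRange m, j < m := by
  intro m
  induction m with
  | zero => intro j hj; cases hj
  | succ m IH =>
    intro j hj
    rw [downRange, List.mem_cons] at hj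
    rcases hj with h | h
    · omega
    · have := IH j h; omega

-- the low bit of an arithmetic right shift of a Python int is the bit of its low 32 bits
theorem pv_bitlow (a : Int) (j : ℕ) (hj : j < 32) :
    PySem.Int.band (a >>> j) 1 = ((low a >>> j) &&& 1 : ℕ) := by
  rw [PySem.Int.band_one, PySem.Int.mod_eq_emod_of_pos (by norm_num : (0:Int) < 2)]
  set L : Int := (low a : Int) with hL
  set q : Int := a / 2 ^ 32 with hqdef
  have hq : a = 2 ^ 32 * q + L := by
    have h : L = a % 2 ^ 32 := by rw [hL]; unfold low; omega
    omega
  have hpow : (2:Int) ^ 32 = 2 ^ j * 2 ^ (32 - j) := by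
    rw [← pow_add]; congr 1; omega
  have ha2 : a = L + 2 ^ (32 - j) * q * 2 ^ j := by rw [hq, hpow]; ring
  have hsplit : a >>> j = L / 2 ^ j + 2 ^ (32 - j) * q := by
    rw [Int.shiftRight_eq_div_pow]
    have hcast : (((2:ℕ) ^ j : ℕ) : Int) = (2:Int) ^ j := by push_cast; ring
    rw [hcast]
    conv_lhs => rw [ha2]
    rw [Int.add_mul_ediv_right _ _ (by positivity : ((2:Int) ^ j) ≠ 0)]
  have hdiv : L / 2 ^ j = ((low a >>> j : ℕ) : Int) := by
    rw [hL, Nat.shiftRight_eq_div_pow]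
    push_cast
    norm_num
  obtain ⟨c, hc⟩ : (2:Int) ∣ 2 ^ (32 - j) * q :=
    Dvd.dvd.mul_right (dvd_pow_self 2 (by omega)) _
  rw [hsplit, hdiv, hc, Nat.and_one_is_mod]
  omega

-- B's port over a descending index list computes the Nat model on the low 32 bits
theorem pv_portB (s : ℕ) (value : Int) :
    ∀ (js : List ℕ) (r : ℕ), (∀ j ∈ js, j < 32) →
      altGo value (↑s) (js.map (Nat.cast : ℕ → ℤ)) (↑r) = ↑(natC (low value) s js r) := by
  intro js
  induction js with
  | nil => intro r _; rfl
  | cons j rest IH =>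
    intro r hmem
    rw [List.map_cons, altGo, natC]
    have hj : j < 32 := hmem j (List.mem_cons_self ..)
    rw [Int.toNat_natCast]
    rw [pv_bitlow value j hj]
    have h2 : ((j : Int) + (s : Int)).toNat = j + s := by omega
    have h3 : PySem.Int.band ((r : Int) >>> (j + s)) 1 = (((r >>> (j + s)) &&& 1 : ℕ) : Int) := by
      rw [show ((r : Int) >>> (j + s)) = ((r >>> (j + s) : ℕ) : Int) by simp,
        show (1 : Int) = ((1 : ℕ) : Int) by simp, PySem.Int.band_natCast]
    rw [h2, h3, PySem.Int.bxor_natCast]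
    have h4 : ((((low value >>> j) &&& 1) ^^^ ((r >>> (j + s)) &&& 1) : ℕ) : Int) <<< j
        = (((((low value >>> j) &&& 1) ^^^ ((r >>> (j + s)) &&& 1)) <<< j : ℕ) : Int) := by
      simp
    rw [h4, PySem.Int.bor_natCast]
    exact IH _ (fun i hi => hmem i (List.mem_cons_of_mem j hi))

-- invariant of B's Nat model: after processing j = m-1 … 0 with the bits above
-- m already correct, every bit equals the recovered word's bit
theorem pv_invC (v s : ℕ) (hs1 : 1 ≤ s) :
    ∀ (m : ℕ), m ≤ 32 → ∀ r : ℕ,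
      (∀ i, r.testBit i = (decide (m ≤ i) && xbit v (s - 1) i)) →
      ∀ i, (natC v s (downRange m) r).testBit i = xbit v (s - 1) i := by
  intro m
  induction m with
  | zero =>
    intro _ r hr i
    rw [downRange, natC, hr i]
    simp
  | succ m IH =>
    intro hm r hr i
    rw [downRange, natC]
    apply IH (by omega)
    intro i2
    set b : ℕ := ((v >>> m) &&& 1) ^^^ ((r >>> (m + s)) &&& 1) with hb
    have hblt : b < 2 := by
      have h1 : (v >>> m) &&& 1 < 2 := lt_of_le_of_lt Nat.and_le_right (by norm_num)
      have h2 : (r >>> (m + s)) &&& 1 < 2 := lt_of_le_of_lt Nat.and_le_right (by norm_num)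
      calc b < 2 ^ 1 := Nat.xor_lt_two_pow (by simpa using h1) (by simpa using h2)
        _ = 2 := by norm_num
    have hb0 : b.testBit 0 = xor (v.testBit m) (r.testBit (m + s)) := by
      rw [hb, Nat.testBit_xor, Nat.testBit_and, Nat.testBit_and,
        Nat.testBit_shiftRight, Nat.testBit_shiftRight]
      norm_num
    have hrtop : r.testBit (m + s) = xbit v (s - 1) (m + s) := by
      rw [hr (m + s)]
      have h : m + 1 ≤ m + s := by omega
      simp [h]
    rw [Nat.testBit_lor, Nat.testBit_shiftLeft, hr i2]
    by_cases hi : i2 = m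
    · subst hi
      have h1 : ¬ (i2 + 1 ≤ i2) := by omega
      simp only [h1, decide_false, Bool.false_and, Bool.false_or, le_refl,
        decide_true, Bool.true_and, Nat.sub_self]
      rw [hb0, hrtop, ← pv_xbit_lt v s i2 hs1 (by omega)]
    · by_cases him : m ≤ i2
      · have h1 : m + 1 ≤ i2 := by omega
        have h2 : b.testBit (i2 - m) = false := by
          apply Nat.testBit_lt_two_pow
          calc b < 2 ^ 1 := by simpa using hblt
            _ ≤ 2 ^ (i2 - m) := Nat.pow_le_pow_right (by norm_num) (by omega)
        simp [h1, him, h2]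
      · have h1 : ¬ (m + 1 ≤ i2) := by omega
        simp [h1, him]

-- the two Nat models recover the same word
theorem pv_models_eq (v s : ℕ) (hs1 : 1 ≤ s) (hs2 : s ≤ 32) :
    natA v 0 s 0 33 = natC v s (downRange 32) 0 := by
  have hA0 : natA v 0 s 0 33 = natA (v ^^^ ((0 : ℕ) >>> s)) 0 s 0 33 := by
    simp
  have hbitsA := pv_invA v s hs1 hs2 33 0 0 (by omega) (by
    intro j
    rw [Nat.zero_testBit, Nat.mul_zero, Nat.add_zero]
    by_cases hj : 32 ≤ j
    · rw [pv_xbit_ge v (s - 1) j hj]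
      simp
    · simp [hj])
  have hbitsC := pv_invC v s hs1 32 (le_refl _) 0 (by
    intro i
    rw [Nat.zero_testBit]
    by_cases h : 32 ≤ i
    · rw [pv_xbit_ge v (s - 1) i h]
      simp
    · simp [h])
  apply Nat.eq_of_testBit_eq
  intro j
  rw [hA0, hbitsA j, hbitsC j]

-- ===== VERDICT (by name: the statement is the Claim_ definition above) =====
theorem unbitshift_right_spec : Claim_equal_unbitshift_right := by
  intro value shift _dom hpre
  obtain ⟨h1, h2⟩ := hpre
  unfold Spec_unbitshift_right unbitshift_right unbitshift_right_alt
  set s : ℕ := shift.toNat with hs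
  have hsh : (↑s : Int) = shift := Int.toNat_of_nonneg (by omega)
  have hs1 : 1 ≤ s := by omega
  have hs2 : s ≤ 32 := by omega
  rw [← hsh]
  have hA := pv_portA s hs1 hs2 33 0 0 value
  rw [Nat.cast_zero] at hA
  have hrange : PySem.List.pyRange 31 (-1) (-1) = (downRange 32).map (Nat.cast : ℕ → ℤ) := by
    decide
  have hB := pv_portB s value (downRange 32) 0 (fun j hj => pv_downRange_mem 32 j hj)
  rw [Nat.cast_zero] at hB
  rw [hA, hrange, hB, pv_models_eq (low value) s hs1 hs2]
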